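-- pv_equiv track=rewrite | github.com/Tmh3101/Xpervia | backend/api/services/reco_service/hybrid/candidates.py | _invert_row_map
-- ===== SOURCE A (Python) =====
-- from typing import List, Set, Dict, Optional, Tuple
--
-- def _invert_row_map(row_map: Dict[str, int]) -> List[Optional[int]]:
--     if not row_map:
--         return []
--     n = max(int(v) for v in row_map.values()) + 1
--     inv: List[Optional[int]] = [None] * n
--     for k, v in row_map.items():
--         try:
--             inv[int(v)] = int(k)
--         except Exception:
--             inv[int(v)] = int(k) if str(k).isdigit() else None
--     return inv
-- ===== SOURCE B (Python) =====
-- def _invert_row_map(row_map):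
--     items = sorted(row_map.items(), key=lambda kv: kv[1])
--     if not items:
--         return []
--     n = items[-1][1] + 1
--     out = []
--     j = 0
--     for i in range(n):
--         val = None
--         while j < len(items) and items[j][1] == i:
--             try:
--                 val = int(items[j][0])
--             except ValueError:
--                 val = None
--             j += 1
--         out.append(val)
--     return out
-- ===== Notes on version B (the rewrite author's own statement) =====
-- stated objective: alternative
-- what changed: B sorts the items stably by value and builds the output front-to-back with a two-pointer merge over range(max+1), instead of preallocating a [None]*n list and scatter-writing into it by index while iterating the dict.
-- outside the precondition, e.g. on _invert_row_map({'7': -2, 'x': 1}): A returns [7, None], B returns [None, None]; on _invert_row_map({'a': -1}): A raises IndexError, B returns []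
import Mathlib
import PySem

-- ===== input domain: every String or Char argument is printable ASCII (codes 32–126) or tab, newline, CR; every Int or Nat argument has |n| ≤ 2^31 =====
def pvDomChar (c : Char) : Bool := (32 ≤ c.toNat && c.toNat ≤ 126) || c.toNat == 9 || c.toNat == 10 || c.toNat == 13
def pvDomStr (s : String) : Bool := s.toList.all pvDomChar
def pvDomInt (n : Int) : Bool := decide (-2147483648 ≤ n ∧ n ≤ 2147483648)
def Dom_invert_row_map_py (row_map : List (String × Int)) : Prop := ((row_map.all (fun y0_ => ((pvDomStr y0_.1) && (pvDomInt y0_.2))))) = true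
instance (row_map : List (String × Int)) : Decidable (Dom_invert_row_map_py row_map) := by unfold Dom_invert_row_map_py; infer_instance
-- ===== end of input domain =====

-- B sorts the items stably by value and emits the inversion front-to-back with a
-- two-pointer merge over range(max+1), instead of A's scatter writes into a
-- preallocated [None]*n list (objective: alternative).

-- ===== PORT A =====
-- A's loop body: try int(k) write, except-branch fallback.
def pvWriteA (inv : List (Option Int)) (p : String × Int) : List (Option Int) :=
  match PySem.Int.ofStr? p.1 with
  | some i => PySem.List.pySetD inv p.2 (some i)
  | none => PySem.List.pySetD inv p.2
      (if PySem.Str.strIsdigit p.1 then PySem.Int.ofStr? p.1 else none)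

def invert_row_map_py (row_map : List (String × Int)) : List (Option Int) :=
  if row_map = [] then []
  else
    let n : Int := (PySem.List.max? (row_map.map (fun p => p.2)) (fun x => x)).getD 0 + 1
    let inv : List (Option Int) := List.replicate n.toNat none
    row_map.foldl pvWriteA inv

-- ===== PORT B =====
-- Source B's inner while loop: advance j past the entries whose value equals i,
-- updating val (try int(k) / except val = None, i.e. ofStr?).
def pvConsume (i : Int) (val : Option Int) : List (String × Int) → Option Int × List (String × Int)
  | [] => (val, [])
  | (k, v) :: t => if v = i then pvConsume i (PySem.Int.ofStr? k) t else (val, (k, v) :: t)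

-- Source B's outer for-loop body: consume value class i, append val to out.
def pvStep (st : List (Option Int) × List (String × Int)) (i : Int) :
    List (Option Int) × List (String × Int) :=
  let r := pvConsume i none st.2
  (st.1 ++ [r.1], r.2)

def invert_row_map_py_alt (row_map : List (String × Int)) : List (Option Int) :=
  let items := PySem.List.sorted row_map (fun kv => kv.2)
  if items = [] then []
  else
    -- items[-1][1]: in range under the guard above, so the default is never used
    let n : Int := (PySem.List.pyGetD items (-1) ("", 0)).2 + 1
    ((PySem.List.pyRange 0 n 1).foldl pvStep ([], items)).1

-- ===== PRECONDITION & SPEC =====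
-- Pre_ restricts to nonnegative values — the natural domain of a row-index map: on maps
-- with a negative value A raises IndexError (value < -(max+1)) or writes through Python's
-- negative list index, while B only places keys in 0..max.
def Pre_invert_row_map_py (row_map : List (String × Int)) : Prop :=
  ∀ p ∈ row_map, 0 ≤ p.2
instance (row_map : List (String × Int)) : Decidable (Pre_invert_row_map_py row_map) := by unfold Pre_invert_row_map_py; infer_instance
def pvWitness_invert_row_map_py : (List (String × Int)) := [("7", 0), ("x", 1)]

def Spec_invert_row_map_py (row_map : List (String × Int)) (out : List (Option Int)) : Prop := out = invert_row_map_py_alt row_map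
instance (row_map : List (String × Int)) (out : List (Option Int)) : Decidable (Spec_invert_row_map_py row_map out) := by unfold Spec_invert_row_map_py; infer_instance

-- ===== CLAIM =====
def Claim_equal_invert_row_map_py : Prop := ∀ (row_map : List (String × Int)), Dom_invert_row_map_py row_map → Pre_invert_row_map_py row_map → Spec_invert_row_map_py row_map (invert_row_map_py row_map)

-- ===== LEMMAS AND PROOFS =====

-- For an ASCII key k the except-branch of A always stores None (isdigit ⇒ int(k) parses),
-- so A's write is pySetD inv p.2 (ofStr? p.1).
theorem writeA_eq (inv : List (Option Int)) (p : String × Int) :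
    pvWriteA inv p = PySem.List.pySetD inv p.2 (PySem.Int.ofStr? p.1) := by
  unfold pvWriteA
  cases h : PySem.Int.ofStr? p.1 with
  | some i => rfl
  | none => simp

-- the last entry of the value class c in l, parsed; d if the class is empty
def pvLastD (c : Int) (l : List (String × Int)) (d : Option Int) : Option Int :=
  ((l.filter (fun p => decide (p.2 = c))).getLast?).elim d (fun p => PySem.Int.ofStr? p.1)

theorem cons_getLast_elim {α β : Type} (f : α → β) (d : β) (a : α) (l : List α) :
    ((a :: l).getLast?).elim d f = (l.getLast?).elim (f a) f := by
  cases l with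
  | nil => rfl
  | cons b t =>
    rw [List.getLast?_cons_cons]
    cases h : (b :: t).getLast? with
    | none => simp at h
    | some x => rfl

-- ----- A side: loop invariant -----
theorem loopA (l : List (String × Int)) : ∀ (inv : List (Option Int)),
    (∀ p ∈ l, 0 ≤ p.2 ∧ p.2 < (inv.length : Int)) →
    (l.foldl pvWriteA inv).length = inv.length ∧
    (∀ i : Nat, i < inv.length →
      PySem.List.pyGetD (l.foldl pvWriteA inv) (i : Int) none =
        pvLastD (i : Int) l (PySem.List.pyGetD inv (i : Int) none)) := by
  induction l with
  | nil =>
    intro inv _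
    refine ⟨rfl, fun i _ => ?_⟩
    simp [pvLastD]
  | cons p t ih =>
    intro inv hb
    have hp := hb p (List.mem_cons_self ..)
    have hvnat : p.2 = ((p.2.toNat : Nat) : Int) := by omega
    have hlt : p.2.toNat < inv.length := by omega
    rw [List.foldl_cons, writeA_eq inv p]
    have hlen' : (PySem.List.pySetD inv p.2 (PySem.Int.ofStr? p.1)).length = inv.length := by
      rw [hvnat, PySem.List.pySetD_natCast]; simp
    obtain ⟨hlen, hval⟩ := ih (PySem.List.pySetD inv p.2 (PySem.Int.ofStr? p.1))
      (by rw [hlen']; exact fun q hq => hb q (List.mem_cons_of_mem _ hq))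
    refine ⟨by rw [hlen, hlen'], fun i hi => ?_⟩
    rw [hval i (by omega)]
    have hget : PySem.List.pyGetD (PySem.List.pySetD inv p.2 (PySem.Int.ofStr? p.1)) (i : Int) none =
        if i = p.2.toNat then PySem.Int.ofStr? p.1 else PySem.List.pyGetD inv (i : Int) none := by
      rw [hvnat]; exact PySem.List.pyGetD_pySetD_natCast inv p.2.toNat i _ none hlt
    rw [hget]
    by_cases hc : p.2 = (i : Int)
    · have : i = p.2.toNat := by omega
      rw [if_pos this]
      unfold pvLastD
      rw [List.filter_cons_of_pos (by simpa using hc), cons_getLast_elim]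
    · have : ¬ i = p.2.toNat := by omega
      rw [if_neg this]
      unfold pvLastD
      rw [List.filter_cons_of_neg (by simpa using hc)]

-- ----- B side: the stable insertion sort preserves each value class -----
theorem pairwise_insertBy (x : String × Int) (ys : List (String × Int))
    (h : ys.Pairwise (fun a b => a.2 ≤ b.2)) :
    (PySem.List.insertBy (fun a b => decide (a.2 < b.2)) x ys).Pairwise
      (fun a b => a.2 ≤ b.2) := by
  induction ys with
  | nil => simp [PySem.List.insertBy]
  | cons y ys ih =>
    rw [List.pairwise_cons] at h
    unfold PySem.List.insertBy
    by_cases hxy : x.2 < y.2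
    · simp only [hxy, decide_true, if_true]
      refine List.pairwise_cons.mpr ⟨?_, List.pairwise_cons.mpr h⟩
      intro z hz
      rcases List.mem_cons.mp hz with rfl | hz
      · exact le_of_lt hxy
      · exact le_trans (le_of_lt hxy) (h.1 z hz)
    · simp only [hxy, decide_false, Bool.false_eq_true, if_false]
      refine List.pairwise_cons.mpr ⟨?_, ih h.2⟩
      intro z hz
      rcases (PySem.List.mem_insertBy _ x z ys).mp hz with rfl | hz
      · omega
      · exact h.1 z hz

theorem filter_insertBy (c : Int) (x : String × Int) (ys : List (String × Int))
    (h : ys.Pairwise (fun a b => a.2 ≤ b.2)) :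
    (PySem.List.insertBy (fun a b => decide (a.2 < b.2)) x ys).filter
        (fun p => decide (p.2 = c)) =
      ys.filter (fun p => decide (p.2 = c)) ++ (if x.2 = c then [x] else []) := by
  induction ys with
  | nil => simp [PySem.List.insertBy, List.filter]; split_ifs <;> simp_all
  | cons y ys ih =>
    rw [List.pairwise_cons] at h
    unfold PySem.List.insertBy
    by_cases hxy : x.2 < y.2
    · simp only [hxy, decide_true, if_true]
      by_cases hxc : x.2 = c
      · have hnil : (y :: ys).filter (fun p => decide (p.2 = c)) = [] := by
          rw [List.filter_eq_nil_iff]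
          intro z hz
          rcases List.mem_cons.mp hz with rfl | hz
          · simp; omega
          · have := h.1 z hz; simp; omega
        rw [List.filter_cons_of_pos (by simpa using hxc), hnil]
        simp [hxc]
      · rw [List.filter_cons_of_neg (by simpa using hxc)]
        simp [hxc]
    · simp only [hxy, decide_false, Bool.false_eq_true, if_false]
      by_cases hyc : y.2 = c
      · rw [List.filter_cons_of_pos (by simpa using hyc),
          List.filter_cons_of_pos (by simpa using hyc), ih h.2, List.cons_append]
      · rw [List.filter_cons_of_neg (by simpa using hyc),
          List.filter_cons_of_neg (by simpa using hyc), ih h.2]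

theorem foldl_insertBy_filter (c : Int) (l : List (String × Int)) :
    ∀ acc : List (String × Int), acc.Pairwise (fun a b => a.2 ≤ b.2) →
    (l.foldl (fun acc x => PySem.List.insertBy (fun a b => decide (a.2 < b.2)) x acc) acc).filter
        (fun p => decide (p.2 = c)) =
      acc.filter (fun p => decide (p.2 = c)) ++ l.filter (fun p => decide (p.2 = c)) := by
  induction l with
  | nil => intro acc _; simp
  | cons x l ih =>
    intro acc hacc
    rw [List.foldl_cons, ih _ (pairwise_insertBy x acc hacc), filter_insertBy c x acc hacc]
    by_cases hxc : x.2 = c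
    · rw [List.filter_cons_of_pos (by simpa using hxc)]
      simp [hxc]
    · rw [List.filter_cons_of_neg (by simpa using hxc)]
      simp [hxc]

-- stability: sorting by value does not change any value class (content or order)
theorem sorted_filter_eq (xs : List (String × Int)) (c : Int) :
    (PySem.List.sorted xs (fun kv => kv.2)).filter (fun p => decide (p.2 = c)) =
      xs.filter (fun p => decide (p.2 = c)) := by
  rw [PySem.List.sorted_eq_foldl_insertBy xs (fun kv => kv.2)]
  simpa using foldl_insertBy_filter c xs [] List.Pairwise.nil

-- so pvLastD is the same on the sorted list
theorem pvLastD_sorted (xs : List (String × Int)) (c : Int) (d : Option Int) :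
    pvLastD c (PySem.List.sorted xs (fun kv => kv.2)) d = pvLastD c xs d := by
  unfold pvLastD
  rw [sorted_filter_eq]

-- ----- B side: the while loop on a sorted suffix -----
theorem consume_spec (items : List (String × Int)) : ∀ (i : Int) (val : Option Int),
    items.Pairwise (fun a b => a.2 ≤ b.2) → (∀ p ∈ items, i ≤ p.2) →
    pvConsume i val items =
      (pvLastD i items val, items.filter (fun p => !decide (p.2 = i))) := by
  induction items with
  | nil => intro i val _ _; simp [pvConsume, pvLastD]
  | cons p t ih =>
    intro i val hp hall
    obtain ⟨k, v⟩ := p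
    rw [List.pairwise_cons] at hp
    by_cases hv : v = i
    · simp only [pvConsume]
      rw [if_pos hv]
      rw [ih i (PySem.Int.ofStr? k) hp.2 (fun q hq => hall q (List.mem_cons_of_mem _ hq))]
      unfold pvLastD
      rw [List.filter_cons_of_pos (by simpa using hv), cons_getLast_elim,
        List.filter_cons_of_neg (by simp [hv])]
    · simp only [pvConsume]
      rw [if_neg hv]
      have hvi : i < v := lt_of_le_of_ne (hall (k, v) (List.mem_cons_self ..)) (fun h => hv h.symm)
      have h1 : ((k, v) :: t).filter (fun p => decide (p.2 = i)) = [] := by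
        rw [List.filter_eq_nil_iff]
        intro z hz
        rcases List.mem_cons.mp hz with rfl | hz
        · simp; omega
        · have := hp.1 z hz; simp at this ⊢; omega
      have h2 : ((k, v) :: t).filter (fun p => !decide (p.2 = i)) = (k, v) :: t := by
        rw [List.filter_eq_self]
        intro z hz
        rcases List.mem_cons.mp hz with rfl | hz
        · simp; omega
        · have := hp.1 z hz; simp at this ⊢; omega
      rw [h2]
      unfold pvLastD
      rw [h1]
      rfl

-- ----- B side: the for-loop over range -----
theorem loopB (m : Nat) : ∀ (i0 : Int) (items : List (String × Int)) (acc : List (Option Int)),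
    items.Pairwise (fun a b => a.2 ≤ b.2) → (∀ p ∈ items, i0 ≤ p.2) →
    ((PySem.List.pyRange i0 (i0 + m) 1).foldl pvStep (acc, items)).1 =
      acc ++ (PySem.List.pyRange i0 (i0 + m) 1).map (fun c => pvLastD c items none) := by
  induction m with
  | zero =>
    intro i0 items acc _ _
    have : PySem.List.pyRange i0 (i0 + (0 : Nat)) 1 = [] := by
      apply List.eq_nil_of_length_eq_zero
      rw [PySem.List.length_pyRange_one]; omega
    rw [this]
    simp
  | succ m ih =>
    intro i0 items acc hp hall
    have hcons : PySem.List.pyRange i0 (i0 + ((m : Nat) + 1 : Nat)) 1 =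
        i0 :: PySem.List.pyRange (i0 + 1) (i0 + ((m : Nat) + 1 : Nat)) 1 :=
      PySem.List.pyRange_one_cons (by push_cast; omega)
    rw [hcons, List.foldl_cons, List.map_cons]
    have hstep : pvStep (acc, items) i0 =
        (acc ++ [pvLastD i0 items none], items.filter (fun p => !decide (p.2 = i0))) := by
      unfold pvStep
      rw [consume_spec items i0 none hp hall]
    rw [hstep]
    have hrange : i0 + ((m : Nat) + 1 : Nat) = (i0 + 1) + (m : Nat) := by push_cast; omega
    rw [hrange]
    rw [ih (i0 + 1) (items.filter (fun p => !decide (p.2 = i0))) (acc ++ [pvLastD i0 items none])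
      (hp.filter _)
      (by intro q hq
          obtain ⟨hq1, hq2⟩ := List.mem_filter.mp hq
          have := hall q hq1
          simp at hq2
          omega)]
    rw [List.append_assoc]
    congr 1
    show _ = [pvLastD i0 items none] ++ _
    rw [List.singleton_append]
    congr 1
    apply List.map_congr_left
    intro c hc
    have hc' := (PySem.List.mem_pyRange_one).mp hc
    unfold pvLastD
    have hfe : List.filter (fun p => decide (p.2 = c))
        (List.filter (fun p => !decide (p.2 = i0)) items) =
        List.filter (fun p => decide (p.2 = c)) items := by
      rw [List.filter_filter]
      apply List.filter_congr
      intro a _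
      by_cases hac : a.2 = c
      · simp [hac]; omega
      · simp [hac]
    rw [hfe]

-- ===== VERDICT =====
theorem invert_row_map_py_spec : Claim_equal_invert_row_map_py := by
  intro row_map _ hpre
  unfold Spec_invert_row_map_py invert_row_map_py invert_row_map_py_alt
  by_cases hemp : row_map = []
  · simp [hemp, PySem.List.sorted]
  · have hitems_ne : PySem.List.sorted row_map (fun kv => kv.2) ≠ [] := by
      rw [Ne, PySem.List.sorted_eq_nil_iff]; exact hemp
    simp only [if_neg hemp, if_neg hitems_ne]
    set items := PySem.List.sorted row_map (fun kv => kv.2) with hitems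
    -- the max value M
    have hvals_ne : row_map.map (fun p => p.2) ≠ [] := by simpa using hemp
    obtain ⟨M, hM⟩ := Option.ne_none_iff_exists'.mp
      (fun hx => hvals_ne ((PySem.List.max?_eq_none_iff
        (row_map.map (fun p => p.2)) (fun x : Int => x)).mp hx))
    have hM0 : 0 ≤ M := by
      have hmem := PySem.List.max?_mem hM
      simp only [List.mem_map] at hmem
      obtain ⟨q, hq, hq2⟩ := hmem
      have := hpre q hq; omega
    -- items[-1].2 = M
    have hlast : (PySem.List.pyGetD items (-1) ("", 0)).2 = M := by
      rw [PySem.List.pyGetD_neg_one items _ hitems_ne]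
      have hmemlast := List.getLast_mem hitems_ne
      have hle : (items.getLast hitems_ne).2 ≤ M := by
        apply PySem.List.max?_isMax hM
        exact List.mem_map_of_mem ((PySem.List.mem_sorted _ _ _ _).mp hmemlast)
      have hge : M ≤ (items.getLast hitems_ne).2 := by
        have hmem := PySem.List.max?_mem hM
        simp only [List.mem_map] at hmem
        obtain ⟨q, hq, hq2⟩ := hmem
        have hqitems : q ∈ items := (PySem.List.mem_sorted _ _ _ _).mpr hq
        obtain ⟨j, hj, hjq⟩ := List.mem_iff_getElem.mp hqitems
        have hmono : items[j].2 ≤ items[items.length - 1].2 :=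
          PySem.List.key_sorted_getElem_mono row_map (fun kv => kv.2)
            (p := j) (q := items.length - 1) (by omega)
            (by show items.length - 1 < items.length; omega)
        rw [List.getLast_eq_getElem]
        calc M = q.2 := hq2.symm
          _ = items[j].2 := by rw [hjq]
          _ ≤ items[items.length - 1].2 := hmono
      omega
    rw [hlast]
    -- A side
    rw [hM]
    have hbound : ∀ p ∈ row_map, 0 ≤ p.2 ∧ p.2 < ((List.replicate (M + 1).toNat
        (none : Option Int)).length : Int) := by
      intro q hq
      refine ⟨hpre q hq, ?_⟩
      have := PySem.List.max?_isMax hM q.2 (List.mem_map_of_mem hq)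
      simp only [List.length_replicate]
      omega
    obtain ⟨hlenA, hvalA⟩ := loopA row_map _ hbound
    simp only [Option.getD_some] at *
    -- B side
    have hloopB := loopB (M + 1).toNat 0 items []
      (PySem.List.sorted_pairwise row_map (fun kv => kv.2))
      (by intro q hq; exact hpre q ((PySem.List.mem_sorted _ _ _ _).mp hq))
    simp only [zero_add, List.nil_append] at hloopB
    have hMcast : ((M + 1).toNat : Int) = M + 1 := by omega
    rw [hMcast] at hloopB
    rw [hloopB]
    -- elementwise
    apply List.ext_getElem
    · rw [hlenA, List.length_replicate, List.length_map, PySem.List.length_pyRange_one]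
      omega
    · intro k hk1 hk2
      rw [hlenA, List.length_replicate] at hk1
      have hgetB := PySem.List.getElem?_map_pyRange_zero
        (fun c => pvLastD c items none) (M + 1).toNat k hk1
      rw [hMcast] at hgetB
      rw [List.getElem?_eq_getElem hk2] at hgetB
      have hgetB' := Option.some.inj hgetB
      rw [hgetB', hitems]
      simp only [pvLastD_sorted]
      have hA := hvalA k (by simpa using hk1)
      rw [PySem.List.pyGetD_natCast, PySem.List.pyGetD_natCast] at hA
      have hk3 : k < (List.foldl pvWriteA (List.replicate (M + 1).toNat none) row_map).length := by
        rw [hlenA, List.length_replicate]; exact hk1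
      rw [List.getD_eq_getElem _ _ hk3] at hA
      rw [hA]
      congr 1
      simp [List.getD]
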